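-- pv_equiv track=rewrite | github.com/georgecharatsaris/Aspect-Based-Sentiment-Analysis-on-Airline-Reviews | utils.py | bioScheme
-- ===== SOURCE A (Python) =====
-- def bioScheme(texts, starts, ends, bert=False):
--
--     bio_tags = []
--
--     for text, start, end in zip(texts, starts, ends):
--         index = 0
--
--         if not bert:
--             sent_tags = []
--         else:
--             sent_tags = ['<PAD>']
--
--         previous_flag = 'O'
--
--         min_start, max_start = min(start), max(start)
--         min_end, max_end = min(end), max(end)
--
--         for word in text.split():
--             position = index + len(word)
--
--             if position < max_start:
--                 if position < min_start or position > min_end: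
--                     sent_tags.append('O')
--                     previous_flag = 'O'
--                     index += len(word) + 1
--                 else:
--                     if previous_flag == 'O':
--                         sent_tags.append('B')
--                         previous_flag = 'B'
--                         index += len(word) + 1
--                     else:
--                         sent_tags.append('I')
--                         index += len(word) + 1
--             else:
--                 if position > max_end:
--                     sent_tags.append('O')
--                     previous_flag = 'O'
--                     index += len(word) + 1
--                 else:
--                     if previous_flag == 'O':
--                         sent_tags.append('B')
--                         previous_flag = 'B'
--                         index += len(word) + 1
--                     else:
--                         sent_tags.append('I')
--                         index += len(word) + 1
--
--         if bert:
--             sent_tags.append('<PAD>')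
--
--         bio_tags.append(sent_tags)
--
--     return bio_tags
-- ===== SOURCE B (Python) =====
-- def bioScheme(texts, starts, ends, bert=False):
--     bio_tags = []
--     for text, start, end in zip(texts, starts, ends):
--         min_start, max_start = min(start), max(start)
--         min_end, max_end = min(end), max(end)
--
--         # pass 1: entity mask per word, tracking the cumulative char position
--         mask = []
--         pos = 0
--         for word in text.split():
--             pos += len(word)
--             mask.append((pos < max_start and min_start <= pos <= min_end)
--                         or (max_start <= pos <= max_end))
--             pos += 1
--
--         # pass 2: label runs by zipping the mask with itself shifted by one
--         tags = ['O' if not ent else ('I' if prev else 'B')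
--                 for ent, prev in zip(mask, [False] + mask)]
--
--         if bert:
--             tags = ['<PAD>'] + tags + ['<PAD>']
--         bio_tags.append(tags)
--     return bio_tags
-- ===== Notes on version B (the rewrite author's own statement) =====
-- stated objective: simpler
-- what changed: Replaces A's single stateful loop (running tag list, previous_flag string, nested 4-way branch) by two plain passes: build a boolean entity mask with one condition, then label B/I/O by zipping the mask with itself shifted by one; bert padding becomes one list expression.
-- outside the precondition, e.g. on bioScheme(['a b'], [[]], [[1]], False): A raises ValueError, B raises ValueError
import Mathlib
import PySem

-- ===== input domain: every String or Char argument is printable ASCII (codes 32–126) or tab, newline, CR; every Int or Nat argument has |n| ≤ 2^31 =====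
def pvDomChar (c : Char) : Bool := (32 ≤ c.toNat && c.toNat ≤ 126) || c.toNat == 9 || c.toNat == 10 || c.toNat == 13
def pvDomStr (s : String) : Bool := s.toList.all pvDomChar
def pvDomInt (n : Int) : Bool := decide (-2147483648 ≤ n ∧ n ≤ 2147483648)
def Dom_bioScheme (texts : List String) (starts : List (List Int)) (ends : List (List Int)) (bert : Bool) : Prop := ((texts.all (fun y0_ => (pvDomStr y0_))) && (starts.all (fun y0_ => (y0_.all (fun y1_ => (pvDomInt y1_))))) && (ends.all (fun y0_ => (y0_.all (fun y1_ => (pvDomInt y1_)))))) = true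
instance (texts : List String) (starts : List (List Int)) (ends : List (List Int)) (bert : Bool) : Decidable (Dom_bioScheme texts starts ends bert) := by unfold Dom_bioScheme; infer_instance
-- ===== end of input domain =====

-- B differs from A by decomposition: A's one stateful loop (tags/previous_flag/index) becomes
-- two plain passes — build a boolean entity mask, then label it by zipping with its own shift.

-- ===== PORT A =====
-- A's inner word loop: state = (sent_tags, index, previous_flag), branches in A's order.
def bioA_loop (min_start max_start min_end max_end : Int) :
    List String → (List String × Int × String) → (List String × Int × String)
  | [], st => st
  | word :: ws, (tags, index, prev) =>
      let position := index + (PySem.Str.len word : Int)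
      if position < max_start then
        if position < min_start ∨ position > min_end then
          bioA_loop min_start max_start min_end max_end ws
            (tags ++ ["O"], index + PySem.Str.len word + 1, "O")
        else
          if prev == "O" then
            bioA_loop min_start max_start min_end max_end ws
              (tags ++ ["B"], index + PySem.Str.len word + 1, "B")
          else
            bioA_loop min_start max_start min_end max_end ws
              (tags ++ ["I"], index + PySem.Str.len word + 1, prev)
      else
        if position > max_end then
          bioA_loop min_start max_start min_end max_end ws
            (tags ++ ["O"], index + PySem.Str.len word + 1, "O")
        else
          if prev == "O" then
            bioA_loop min_start max_start min_end max_end ws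
              (tags ++ ["B"], index + PySem.Str.len word + 1, "B")
          else
            bioA_loop min_start max_start min_end max_end ws
              (tags ++ ["I"], index + PySem.Str.len word + 1, prev)

def bioScheme (texts : List String) (starts : List (List Int)) (ends : List (List Int)) (bert : Bool) : List (List String) :=
  (texts.zip (starts.zip ends)).foldl (fun bio_tags tse =>
    bio_tags ++
      [-- min()/max() raise ValueError on an empty list: the none case is outside Pre_ (guard only)
       match PySem.List.min? tse.2.1 (fun x => x), PySem.List.max? tse.2.1 (fun x => x),
             PySem.List.min? tse.2.2 (fun x => x), PySem.List.max? tse.2.2 (fun x => x) with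
       | some min_start, some max_start, some min_end, some max_end =>
           let init : List String := if !bert then [] else ["<PAD>"]
           let st := bioA_loop min_start max_start min_end max_end (PySem.Str.split₀ tse.1) (init, 0, "O")
           if bert then st.1 ++ ["<PAD>"] else st.1
       | _, _, _, _ => []]) []

-- ===== PORT B =====
-- pass 1: entity mask per word with a running char position
def bioMask (min_start max_start min_end max_end : Int) : List String → Int → List Bool
  | [], _ => []
  | word :: ws, pos =>
      let p := pos + (PySem.Str.len word : Int)
      ((decide (p < max_start) && decide (min_start ≤ p) && decide (p ≤ min_end)) ||
       (decide (max_start ≤ p) && decide (p ≤ max_end)))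
        :: bioMask min_start max_start min_end max_end ws (p + 1)

-- pass 2: zip the mask with its own shift and label
def bioLabel (mask : List Bool) : List String :=
  (mask.zip (false :: mask)).map (fun ep => if !ep.1 then "O" else if ep.2 then "I" else "B")

def bioScheme_alt (texts : List String) (starts : List (List Int)) (ends : List (List Int)) (bert : Bool) : List (List String) :=
  (texts.zip (starts.zip ends)).map (fun tse =>
    -- min()/max() raise ValueError on an empty list: the none case is outside Pre_ (guard only)
    match PySem.List.min? tse.2.1 (fun x => x) with
    | none => []
    | some min_start =>
      match PySem.List.max? tse.2.1 (fun x => x) with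
      | none => []
      | some max_start =>
        match PySem.List.min? tse.2.2 (fun x => x) with
        | none => []
        | some min_end =>
          match PySem.List.max? tse.2.2 (fun x => x) with
          | none => []
          | some max_end =>
            let tags := bioLabel (bioMask min_start max_start min_end max_end (PySem.Str.split₀ tse.1) 0)
            if bert then "<PAD>" :: tags ++ ["<PAD>"] else tags)

-- ===== PRECONDITION & SPEC =====
-- Pre_ excludes exactly the inputs where Python A raises ValueError: a zipped triple whose
-- start or end list is empty (min()/max() of an empty sequence).
def Pre_bioScheme (texts : List String) (starts : List (List Int)) (ends : List (List Int)) (bert : Bool) : Prop :=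
  ∀ p ∈ texts.zip (starts.zip ends), p.2.1 ≠ [] ∧ p.2.2 ≠ []
instance (texts : List String) (starts : List (List Int)) (ends : List (List Int)) (bert : Bool) : Decidable (Pre_bioScheme texts starts ends bert) := by unfold Pre_bioScheme; infer_instance

def pvWitness_bioScheme : List String × List (List Int) × List (List Int) × Bool :=
  (["the nice crew was great"], [[4, 9]], [[12, 18]], true)

def Spec_bioScheme (texts : List String) (starts : List (List Int)) (ends : List (List Int)) (bert : Bool) (out : List (List String)) : Prop := out = bioScheme_alt texts starts ends bert
instance (texts : List String) (starts : List (List Int)) (ends : List (List Int)) (bert : Bool) (out : List (List String)) : Decidable (Spec_bioScheme texts starts ends bert out) := by unfold Spec_bioScheme; infer_instance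

-- ===== CLAIM (what is proved, stated in full; the proofs are below) =====
def Claim_equal_bioScheme : Prop := ∀ (texts : List String) (starts : List (List Int)) (ends : List (List Int)) (bert : Bool), Dom_bioScheme texts starts ends bert → Pre_bioScheme texts starts ends bert → Spec_bioScheme texts starts ends bert (bioScheme texts starts ends bert)

-- ===== LEMMAS AND PROOFS =====

-- run labelling with an explicit "previous word was an entity" flag
def bioRun : List Bool → Bool → List String
  | [], _ => []
  | e :: es, p => (if !e then "O" else if p then "I" else "B") :: bioRun es e

theorem bioLabel_eq_run (mask : List Bool) : bioLabel mask = bioRun mask false := by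
  unfold bioLabel
  suffices h : ∀ (m : List Bool) (p : Bool),
      (m.zip (p :: m)).map (fun ep => if !ep.1 then "O" else if ep.2 then "I" else "B") = bioRun m p by
    exact h mask false
  intro m
  induction m with
  | nil => intro p; rfl
  | cons e es ih => intro p; simp [bioRun, ← ih e]

theorem bioA_loop_eq (min_start max_start min_end max_end : Int) (ws : List String)
    (tags : List String) (index : Int) (pb : Bool) :
    (bioA_loop min_start max_start min_end max_end ws (tags, index, if pb then "B" else "O")).1
      = tags ++ bioRun (bioMask min_start max_start min_end max_end ws index) pb := by
  induction ws generalizing tags index pb with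
  | nil => simp [bioA_loop, bioMask, bioRun]
  | cons w ws ih =>
    simp only [bioA_loop, bioMask, bioRun]
    generalize (PySem.Str.len w : Int) = L
    by_cases h1 : index + L < max_start
    · by_cases h2 : index + L < min_start ∨ index + L > min_end
      · have he : (decide (index + L < max_start) && decide (min_start ≤ index + L) && decide (index + L ≤ min_end) ||
            decide (max_start ≤ index + L) && decide (index + L ≤ max_end)) = false := by
          simp only [Bool.or_eq_false_iff, Bool.and_eq_false_iff, decide_eq_false_iff_not, not_le, not_lt]
          omega
        rw [if_pos h1, if_pos h2, he]
        have h := ih (tags ++ ["O"]) (index + L + 1) false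
        simp only [Bool.false_eq_true, if_false] at h
        simp [h]
      · have he : (decide (index + L < max_start) && decide (min_start ≤ index + L) && decide (index + L ≤ min_end) ||
            decide (max_start ≤ index + L) && decide (index + L ≤ max_end)) = true := by
          push Not at h2
          simp only [Bool.or_eq_true, Bool.and_eq_true, decide_eq_true_eq]
          left; omega
        rw [if_pos h1, if_neg h2, he]
        cases pb with
        | false =>
          have h := ih (tags ++ ["B"]) (index + L + 1) true
          simp at h
          simp [h]
        | true =>
          have h := ih (tags ++ ["I"]) (index + L + 1) true
          simp at h
          simp [h]
    · by_cases h3 : index + L > max_end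
      · have he : (decide (index + L < max_start) && decide (min_start ≤ index + L) && decide (index + L ≤ min_end) ||
            decide (max_start ≤ index + L) && decide (index + L ≤ max_end)) = false := by
          simp only [Bool.or_eq_false_iff, Bool.and_eq_false_iff, decide_eq_false_iff_not, not_le, not_lt]
          omega
        rw [if_neg h1, if_pos h3, he]
        have h := ih (tags ++ ["O"]) (index + L + 1) false
        simp only [Bool.false_eq_true, if_false] at h
        simp [h]
      · have he : (decide (index + L < max_start) && decide (min_start ≤ index + L) && decide (index + L ≤ min_end) ||
            decide (max_start ≤ index + L) && decide (index + L ≤ max_end)) = true := by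
          simp only [Bool.or_eq_true, Bool.and_eq_true, decide_eq_true_eq]
          right; omega
        rw [if_neg h1, if_neg h3, he]
        cases pb with
        | false =>
          have h := ih (tags ++ ["B"]) (index + L + 1) true
          simp at h
          simp [h]
        | true =>
          have h := ih (tags ++ ["I"]) (index + L + 1) true
          simp at h
          simp [h]

theorem foldl_append_singleton {α β : Type} (f : α → β) (l : List α) (acc : List β) :
    l.foldl (fun a x => a ++ [f x]) acc = acc ++ l.map f := by
  induction l generalizing acc with
  | nil => simp
  | cons x xs ih => simp [ih]

-- ===== VERDICT (by name: the statement is the Claim_ definition above) =====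
theorem bioScheme_spec : Claim_equal_bioScheme := by
  intro texts starts ends bert _ hpre
  unfold Spec_bioScheme bioScheme bioScheme_alt
  rw [foldl_append_singleton]
  · simp only [List.nil_append]
    apply List.map_congr_left
    intro tse hmem
    obtain ⟨hs, he⟩ := hpre tse hmem
    obtain ⟨ms, hms⟩ := Option.ne_none_iff_exists'.mp
      (fun h => hs (Iff.mp (PySem.List.min?_eq_none_iff tse.2.1 (fun x : Int => x)) h))
    obtain ⟨Ms, hMs⟩ := Option.ne_none_iff_exists'.mp
      (fun h => hs (Iff.mp (PySem.List.max?_eq_none_iff tse.2.1 (fun x : Int => x)) h))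
    obtain ⟨me, hme⟩ := Option.ne_none_iff_exists'.mp
      (fun h => he (Iff.mp (PySem.List.min?_eq_none_iff tse.2.2 (fun x : Int => x)) h))
    obtain ⟨Me, hMe⟩ := Option.ne_none_iff_exists'.mp
      (fun h => he (Iff.mp (PySem.List.max?_eq_none_iff tse.2.2 (fun x : Int => x)) h))
    simp only [hms, hMs, hme, hMe]
    rw [show ("O" : String) = if false then "B" else "O" from rfl]
    rw [bioA_loop_eq, ← bioLabel_eq_run]
    cases bert <;> simp
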